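-- pv_equiv track=rewrite | github.com/AceHanded/Advent-of-Code-2022 | Puzzles/Day 16/day16.py | run_order
-- ===== SOURCE A (Python) =====
-- def run_order(distances, flow_rates, start_valve, valves, minutes):
--     """Calculates the amount of pressure released."""
--     pressure_release = 0
--     current_valve = start_valve
--
--     for valve in valves:
--         distance = distances[current_valve][valve] + 1
--         minutes -= distance
--         pressure_release += minutes * flow_rates[valve]
--         current_valve = valve
--
--     return pressure_release
-- ===== SOURCE B (Python) =====
-- def run_order(distances, flow_rates, start_valve, valves, minutes):
--     """Calculates the amount of pressure released.
--
--     Exchange of summation order: instead of tracking remaining minutes at each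
--     valve, start from minutes * (total flow) and charge each hop's cost
--     (distance + 1 minute to open) against the combined flow of every valve
--     opened at or after that hop, walking the route back-to-front.
--     """
--     total = minutes * sum(flow_rates[v] for v in valves)
--     suffix_flow = 0
--     hops = [start_valve] + valves
--     for a, v in reversed(list(zip(hops, valves))):
--         suffix_flow += flow_rates[v]
--         total -= (distances[a][v] + 1) * suffix_flow
--     return total
-- ===== Notes on version B (the rewrite author's own statement) =====
-- stated objective: alternative
-- what changed: Exchanges the order of summation: B never computes elapsed or remaining time per valve; it starts from minutes*sum(all flows) and, walking the route back-to-front, subtracts each hop's cost times the suffix flow (combined flow of valves opened at or after that hop).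
import Mathlib
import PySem

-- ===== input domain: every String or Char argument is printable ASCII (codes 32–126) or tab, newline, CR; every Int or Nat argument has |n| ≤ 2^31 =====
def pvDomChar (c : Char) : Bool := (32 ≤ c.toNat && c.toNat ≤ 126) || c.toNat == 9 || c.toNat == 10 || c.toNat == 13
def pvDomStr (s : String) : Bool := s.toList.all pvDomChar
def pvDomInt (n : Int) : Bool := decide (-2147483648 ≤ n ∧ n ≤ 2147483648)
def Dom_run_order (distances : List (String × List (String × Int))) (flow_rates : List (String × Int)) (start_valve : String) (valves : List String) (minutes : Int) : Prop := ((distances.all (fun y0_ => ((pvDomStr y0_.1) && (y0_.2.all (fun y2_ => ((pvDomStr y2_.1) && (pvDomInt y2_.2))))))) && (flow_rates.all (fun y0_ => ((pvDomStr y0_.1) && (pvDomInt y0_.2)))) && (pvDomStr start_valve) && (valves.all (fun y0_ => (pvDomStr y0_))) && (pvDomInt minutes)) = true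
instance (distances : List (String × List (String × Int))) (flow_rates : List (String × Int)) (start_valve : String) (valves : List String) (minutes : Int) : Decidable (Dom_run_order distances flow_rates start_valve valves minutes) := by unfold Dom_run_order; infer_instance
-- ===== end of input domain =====

-- ===== PORT A =====
-- B replaces A's remaining-minutes state threading by an exchange of summation order,
-- traversed back-to-front (no elapsed/remaining time is ever computed).
-- dict[k] lookup (first match on the association list); none = KeyError, excluded by Pre_.
def pvRow? (distances : List (String × List (String × Int))) (k : String) : Option (List (String × Int)) :=
  (distances.find? (fun p => p.1 == k)).map (·.2)

def pvVal? (row : List (String × Int)) (k : String) : Option Int :=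
  (row.find? (fun p => p.1 == k)).map (·.2)

def pvDist? (distances : List (String × List (String × Int))) (a b : String) : Option Int :=
  (pvRow? distances a).bind (fun r => pvVal? r b)

def run_order (distances : List (String × List (String × Int))) (flow_rates : List (String × Int)) (start_valve : String) (valves : List String) (minutes : Int) : Int :=
  (valves.foldl
    (fun (st : Int × String × Int) (valve : String) =>
      let distance := (pvDist? distances st.2.1 valve).getD 0 + 1
      let m := st.2.2 - distance
      (st.1 + m * (pvVal? flow_rates valve).getD 0, valve, m))
    (0, start_valve, minutes)).1

-- ===== PORT B =====
def run_order_alt (distances : List (String × List (String × Int))) (flow_rates : List (String × Int)) (start_valve : String) (valves : List String) (minutes : Int) : Int :=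
  let total := minutes * (valves.foldl (fun s v => s + (pvVal? flow_rates v).getD 0) 0)
  let hops := start_valve :: valves
  (((hops.zip valves).reverse).foldl
    (fun (st : Int × Int) (p : String × String) =>
      let suf := st.2 + (pvVal? flow_rates p.2).getD 0
      (st.1 - ((pvDist? distances p.1 p.2).getD 0 + 1) * suf, suf))
    (total, 0)).1

-- ===== PRECONDITION & SPEC =====
-- Pre_ excludes exactly the inputs on which Python A raises KeyError: a consecutive hop
-- missing from the distances table, or a visited valve missing from flow_rates.
def Pre_run_order (distances : List (String × List (String × Int))) (flow_rates : List (String × Int)) (start_valve : String) (valves : List String) (minutes : Int) : Prop :=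
  (((start_valve :: valves).zip valves).Forall (fun p => (pvDist? distances p.1 p.2).isSome = true))
  ∧ (valves.Forall (fun v => (pvVal? flow_rates v).isSome = true))
instance (distances : List (String × List (String × Int))) (flow_rates : List (String × Int)) (start_valve : String) (valves : List String) (minutes : Int) : Decidable (Pre_run_order distances flow_rates start_valve valves minutes) := by unfold Pre_run_order; infer_instance

def pvWitness_run_order : (List (String × List (String × Int))) × (List (String × Int)) × String × List String × Int :=
  ([("A", [("B", 1)]), ("B", [("C", 2)])], [("B", 5), ("C", 3)], "A", ["B", "C"], 10)

def Spec_run_order (distances : List (String × List (String × Int))) (flow_rates : List (String × Int)) (start_valve : String) (valves : List String) (minutes : Int) (out : Int) : Prop := out = run_order_alt distances flow_rates start_valve valves minutes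
instance (distances : List (String × List (String × Int))) (flow_rates : List (String × Int)) (start_valve : String) (valves : List String) (minutes : Int) (out : Int) : Decidable (Spec_run_order distances flow_rates start_valve valves minutes out) := by unfold Spec_run_order; infer_instance

-- ===== CLAIM (what is proved, stated in full; the proofs are below) =====
def Claim_equal_run_order : Prop := ∀ (distances : List (String × List (String × Int))) (flow_rates : List (String × Int)) (start_valve : String) (valves : List String) (minutes : Int), Dom_run_order distances flow_rates start_valve valves minutes → Pre_run_order distances flow_rates start_valve valves minutes → Spec_run_order distances flow_rates start_valve valves minutes (run_order distances flow_rates start_valve valves minutes)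

-- ===== LEMMAS AND PROOFS =====

-- mathematical helpers used only by the proofs
def pvFlow (flow_rates : List (String × Int)) (v : String) : Int := (pvVal? flow_rates v).getD 0
def pvCost (distances : List (String × List (String × Int))) (a b : String) : Int := (pvDist? distances a b).getD 0 + 1

-- total flow of a route
def pvS (flow_rates : List (String × Int)) : List String → Int
  | [] => 0
  | v :: rest => pvFlow flow_rates v + pvS flow_rates rest

-- A's recurrence: pressure released visiting vs from cur with m minutes left
def pvRel (distances : List (String × List (String × Int))) (flow_rates : List (String × Int)) : String → List String → Int → Int
  | _, [], _ => 0
  | cur, v :: rest, m =>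
      (m - pvCost distances cur v) * pvFlow flow_rates v
        + pvRel distances flow_rates v rest (m - pvCost distances cur v)

-- B's quantity: each hop's cost times the suffix flow from that hop on (plus an offset suf)
def pvY (distances : List (String × List (String × Int))) (flow_rates : List (String × Int)) : String → List String → Int → Int
  | _, [], _ => 0
  | cur, v :: rest, suf =>
      pvCost distances cur v * (suf + pvS flow_rates (v :: rest)) + pvY distances flow_rates v rest suf

lemma lemA (distances : List (String × List (String × Int))) (flow_rates : List (String × Int)) :
    ∀ (vs : List String) (cur : String) (m p : Int),
      (vs.foldl
        (fun (st : Int × String × Int) (valve : String) =>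
          let distance := (pvDist? distances st.2.1 valve).getD 0 + 1
          let mm := st.2.2 - distance
          (st.1 + mm * (pvVal? flow_rates valve).getD 0, valve, mm))
        (p, cur, m)).1 = p + pvRel distances flow_rates cur vs m := by
  intro vs
  induction vs with
  | nil => intro cur m p; simp [pvRel]
  | cons v rest ih =>
    intro cur m p
    simp only [List.foldl_cons, pvRel]
    rw [ih]
    simp [pvCost, pvFlow]
    ring

lemma lemSum (flow_rates : List (String × Int)) :
    ∀ (vs : List String) (s : Int),
      vs.foldl (fun s v => s + (pvVal? flow_rates v).getD 0) s = s + pvS flow_rates vs := by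
  intro vs
  induction vs with
  | nil => intro s; simp [pvS]
  | cons v rest ih => intro s; simp only [List.foldl_cons, pvS]; rw [ih]; simp [pvFlow]; ring

lemma lemB (distances : List (String × List (String × Int))) (flow_rates : List (String × Int)) :
    ∀ (vs : List String) (cur : String) (tot suf : Int),
      (((cur :: vs).zip vs).foldr
        (fun (p : String × String) (st : Int × Int) =>
          let s := st.2 + (pvVal? flow_rates p.2).getD 0
          (st.1 - ((pvDist? distances p.1 p.2).getD 0 + 1) * s, s))
        (tot, suf))
      = (tot - pvY distances flow_rates cur vs suf, suf + pvS flow_rates vs) := by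
  intro vs
  induction vs with
  | nil => intro cur tot suf; simp [pvY, pvS]
  | cons v rest ih =>
    intro cur tot suf
    simp only [List.zip_cons_cons, List.foldr_cons]
    rw [ih v tot suf]
    simp only [pvY, pvS, pvCost, pvFlow, Prod.mk.injEq]
    constructor <;> ring

lemma lemRel (distances : List (String × List (String × Int))) (flow_rates : List (String × Int)) :
    ∀ (vs : List String) (cur : String) (m : Int),
      pvRel distances flow_rates cur vs m
        = m * pvS flow_rates vs - pvY distances flow_rates cur vs 0 := by
  intro vs
  induction vs with
  | nil => intro cur m; simp [pvRel, pvS, pvY]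
  | cons v rest ih =>
    intro cur m
    simp only [pvRel, pvY, pvS]
    rw [ih v (m - pvCost distances cur v)]
    ring

-- ===== VERDICT (by name: the statement is the Claim_ definition above) =====
theorem run_order_spec : Claim_equal_run_order := by
  intro distances flow_rates start_valve valves minutes _ _
  unfold Spec_run_order run_order run_order_alt
  simp only [List.foldl_reverse, lemA, lemSum, lemB, lemRel]
  ring
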